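-- pv_equiv track=rewrite | github.com/kovrega/Informatic | Olimp/Lesson 1/Complete_Home/H_Test_№784.py | f
-- ===== SOURCE A (Python) =====
-- def f(p1, p2):
--     P01 = p1
--
--     while p2 > p1 * 2:
--         p2 //= 2
--
--     while p2 != p1 + 1:
--         if p2 == P01:
--             return P01
--
--         p1 //= 2
--         p2 = p2 // 2
--     if p1 == 0 and p2 == 1:
--         return 1
--     if p1 % 2 == 0:
--         return p1 // 2
--     else:
--         p1 //= 2
--         p2 //= 2
--         return f(p1, p2)
-- ===== SOURCE B (Python) =====
-- def f(p1, p2):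
--     a, b = p1, p2
--     # bring b down to a's level or the one just below it
--     while b > 2 * a:
--         b //= 2
--     # a lies on b's root path: a is the answer
--     if b == a or b == 2 * a:
--         return a
--     # climb both paths together until they sit on adjacent nodes
--     while b - a > 1:
--         a //= 2
--         b //= 2
--     if a == 0:
--         return 1
--     # strip trailing right-child steps, then move to the parent
--     while a % 2 == 1:
--         a //= 2
--     return a // 2
-- ===== Notes on version B (the rewrite author's own statement) =====
-- stated objective: alternative
-- what changed: Replaces A's P01-sentinel loop and chain of tail-recursive self-calls with a single forward pass: an explicit ancestor test (truncated b equal to a or 2a) up front, a plain joint-halving climb with no sentinel, and one trailing-odd-bit stripping loop in place of the whole recursion.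
-- intended difference: When p1 is 1 or 2 and p2's binary prefix is exactly 2*p1 (p2 in [2*p1*2^k,(2*p1+1)*2^k)), A returns 0 - its sentinel/recursion bottom misfires for these two smallest indices although for every p1 >= 3 the same ancestor configuration returns p1 - while B returns p1, the intended value since p1 lies on p2's root path (0 is not a node at all). — e.g. on f(1, 2): A returns 0, B returns 1
-- outside the precondition, e.g. on f(-1, -2): A returns -1, B returns -1; on f(2, 1): A does not finish within the time limit, B returns 1; on f(-1, -3): A returns -1, B does not finish within the time limit
import Mathlib
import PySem

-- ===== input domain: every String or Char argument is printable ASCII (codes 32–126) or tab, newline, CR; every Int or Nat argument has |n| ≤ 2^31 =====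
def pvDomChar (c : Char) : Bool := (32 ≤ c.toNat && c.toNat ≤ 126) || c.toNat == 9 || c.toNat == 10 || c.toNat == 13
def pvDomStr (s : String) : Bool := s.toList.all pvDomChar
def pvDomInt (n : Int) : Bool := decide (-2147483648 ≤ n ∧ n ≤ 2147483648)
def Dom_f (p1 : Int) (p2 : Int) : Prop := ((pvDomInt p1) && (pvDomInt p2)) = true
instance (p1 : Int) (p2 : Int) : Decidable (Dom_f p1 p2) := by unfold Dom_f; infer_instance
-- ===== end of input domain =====

-- B replaces A's P01-sentinel loop and tail recursion by one forward pass (ancestor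
-- test, joint climb, trailing-bit strip); A = B on Pre_f outside D_f, and inside D_f
-- (p1 ∈ {1,2} with p2-prefix 2·p1) A returns 0 while B returns the intended p1.

-- ===== PORT A =====
-- while p2 > p1 * 2: p2 //= 2     (fuel-guarded; 64 steps are ample for |args| ≤ 2^31)
def loopA1 : Nat → Int → Int → Int
  | 0, _, p2 => p2
  | n + 1, p1, p2 => if p1 * 2 < p2 then loopA1 n p1 (PySem.Int.floordiv p2 2) else p2

-- while p2 != p1 + 1: if p2 == P01: return P01 ; p1 //= 2; p2 //= 2
-- .inl r = early 'return r', .inr (p1, p2) = normal loop exit with the final state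
def loopA2 : Nat → Int → Int → Int → Sum Int (Int × Int)
  | 0, _, p1, p2 => .inr (p1, p2)
  | n + 1, P01, p1, p2 =>
    if p2 ≠ p1 + 1 then
      if p2 = P01 then .inl P01
      else loopA2 n P01 (PySem.Int.floordiv p1 2) (PySem.Int.floordiv p2 2)
    else .inr (p1, p2)

def fRec : Nat → Int → Int → Int
  | 0, _, _ => 0
  | n + 1, p1, p2 =>
    let P01 := p1
    match loopA2 64 P01 p1 (loopA1 64 p1 p2) with
    | .inl r => r
    | .inr (q1, q2) =>
      if q1 = 0 ∧ q2 = 1 then 1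
      else if PySem.Int.mod q1 2 = 0 then PySem.Int.floordiv q1 2
      else fRec n (PySem.Int.floordiv q1 2) (PySem.Int.floordiv q2 2)

def f (p1 : Int) (p2 : Int) : Int := fRec 64 p1 p2

-- ===== PORT B =====
-- while b > 2 * a: b //= 2
def loopB1 : Nat → Int → Int → Int
  | 0, _, b => b
  | n + 1, a, b => if 2 * a < b then loopB1 n a (PySem.Int.floordiv b 2) else b

-- while b - a > 1: a //= 2; b //= 2
def loopB2 : Nat → Int → Int → Int × Int
  | 0, a, b => (a, b)
  | n + 1, a, b =>
    if 1 < b - a then loopB2 n (PySem.Int.floordiv a 2) (PySem.Int.floordiv b 2) else (a, b)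

-- while a % 2 == 1: a //= 2
def loopB3 : Nat → Int → Int
  | 0, a => a
  | n + 1, a => if PySem.Int.mod a 2 = 1 then loopB3 n (PySem.Int.floordiv a 2) else a

def f_alt (p1 : Int) (p2 : Int) : Int :=
  let b := loopB1 64 p1 p2
  if b = p1 ∨ b = 2 * p1 then p1
  else
    let ab := loopB2 64 p1 b
    if ab.1 = 0 then 1
    else PySem.Int.floordiv (loopB3 64 ab.1) 2

-- ===== PRECONDITION & SPEC =====
-- Pre_f restricts to the tree-index domain 0 ≤ p1 ≤ p2: outside it A loops forever on
-- almost every input (p2 < p1, or negative arguments), except scattered negative pairs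
-- where A's value is only the accidental floor-halving fixpoint -1; outside Pre_f B may
-- return the same value, return a different one, or itself loop.
def Pre_f (p1 : Int) (p2 : Int) : Prop := 0 ≤ p1 ∧ p1 ≤ p2
instance (p1 : Int) (p2 : Int) : Decidable (Pre_f p1 p2) := by unfold Pre_f; infer_instance
def pvWitness_f : Int × Int := (3, 7)

-- When p1 is 1 or 2 and p2's binary prefix is exactly 2·p1, A returns 0 — its
-- sentinel/recursion bottom misfires for these two smallest indices although for every
-- p1 ≥ 3 the same ancestor configuration returns p1 — while B returns p1, the intended
-- value since p1 lies on p2's root path (0 is not a node at all).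
def D_f (p1 : Int) (p2 : Int) : Prop :=
  (p1 = 1 ∨ p1 = 2) ∧
    ∃ k : Fin 64, 2 * p1 * 2 ^ (k : Nat) ≤ p2 ∧ p2 < (2 * p1 + 1) * 2 ^ (k : Nat)
instance (p1 : Int) (p2 : Int) : Decidable (D_f p1 p2) := by unfold D_f; infer_instance

def Spec_f (p1 : Int) (p2 : Int) (out : Int) : Prop := ¬ D_f p1 p2 → out = f_alt p1 p2
instance (p1 : Int) (p2 : Int) (out : Int) : Decidable (Spec_f p1 p2 out) := by unfold Spec_f; infer_instance

def pvDiffWitness_f : Int × Int := (1, 2)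
def pvDiffWitnessOut_f : Int × Int := (0, 1)

-- ===== CLAIM (what is proved, stated in full; the proofs are below) =====
def Claim_unchanged_f : Prop := ∀ (p1 : Int) (p2 : Int), Dom_f p1 p2 → Pre_f p1 p2 → Spec_f p1 p2 (f p1 p2)
def Claim_changed_f : Prop := Dom_f (pvDiffWitness_f.1) (pvDiffWitness_f.2) ∧ Pre_f (pvDiffWitness_f.1) (pvDiffWitness_f.2) ∧ D_f (pvDiffWitness_f.1) (pvDiffWitness_f.2) ∧ f (pvDiffWitness_f.1) (pvDiffWitness_f.2) = pvDiffWitnessOut_f.1 ∧ f_alt (pvDiffWitness_f.1) (pvDiffWitness_f.2) = pvDiffWitnessOut_f.2 ∧ pvDiffWitnessOut_f.1 ≠ pvDiffWitnessOut_f.2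
def Claim_exact_f : Prop := ∀ (p1 : Int) (p2 : Int), Dom_f p1 p2 → Pre_f p1 p2 → D_f p1 p2 → f p1 p2 ≠ f_alt p1 p2

-- ===== LEMMAS AND PROOFS =====

theorem fd2 (a : Int) : PySem.Int.floordiv a 2 = a / 2 :=
  PySem.Int.floordiv_eq_ediv_of_pos (by norm_num)

theorem md2 (a : Int) : PySem.Int.mod a 2 = a % 2 :=
  PySem.Int.mod_eq_emod_of_pos (by norm_num)

theorem loopA1_succ (n : Nat) (a b : Int) :
    loopA1 (n + 1) a b = if a * 2 < b then loopA1 n a (b / 2) else b := by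
  rw [loopA1, fd2]

theorem loopA2_succ (n : Nat) (P01 a b : Int) :
    loopA2 (n + 1) P01 a b =
      if b ≠ a + 1 then
        if b = P01 then .inl P01 else loopA2 n P01 (a / 2) (b / 2)
      else .inr (a, b) := by
  rw [loopA2, fd2, fd2]

theorem loopB1_succ (n : Nat) (a b : Int) :
    loopB1 (n + 1) a b = if 2 * a < b then loopB1 n a (b / 2) else b := by
  rw [loopB1, fd2]

theorem loopB2_succ (n : Nat) (a b : Int) :
    loopB2 (n + 1) a b = if 1 < b - a then loopB2 n (a / 2) (b / 2) else (a, b) := by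
  rw [loopB2, fd2, fd2]

theorem loopB3_succ (n : Nat) (a : Int) :
    loopB3 (n + 1) a = if a % 2 = 1 then loopB3 n (a / 2) else a := by
  rw [loopB3, fd2, md2]

theorem fRec_succ (n : Nat) (p1 p2 : Int) :
    fRec (n + 1) p1 p2 =
      match loopA2 64 p1 p1 (loopA1 64 p1 p2) with
      | .inl r => r
      | .inr (q1, q2) =>
        if q1 = 0 ∧ q2 = 1 then 1
        else if q1 % 2 = 0 then q1 / 2
        else fRec n (q1 / 2) (q2 / 2) := by
  rw [fRec]
  rcases loopA2 64 p1 p1 (loopA1 64 p1 p2) with r | ⟨q1, q2⟩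
  · rfl
  · simp only [fd2, md2]

-- the two first-phase loops are the same halving loop
theorem loopA1_eq_loopB1 (n : Nat) (a b : Int) : loopA1 n a b = loopB1 n a b := by
  induction n generalizing b with
  | zero => rfl
  | succ n ih =>
      rw [loopA1_succ, loopB1_succ, mul_comm]
      split
      · exact ih _
      · rfl

-- A's recursion at (0, 1) returns 0
theorem fRec_zero_one (m : Nat) : fRec (m + 1) 0 1 = 0 := by
  have h1 : loopA1 64 0 1 = 0 := by decide
  have h2 : loopA2 64 0 0 0 = .inl 0 := by decide
  rw [fRec_succ, h1, h2]

-- B's strip loop at 0 stays at 0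
theorem loopB3_zero (m : Nat) : loopB3 m 0 = 0 := by
  cases m with
  | zero => rfl
  | succ n => rw [loopB3_succ, if_neg (by norm_num)]

-- phase-1 termination and bracket: for 0 < a ≤ b < 2^n and fuel m ≥ n the result lies in [a, 2a]
theorem loopA1_bounds (n : Nat) :
    ∀ (m : Nat) (a b : Int), n ≤ m → 0 < a → a ≤ b → b < 2 ^ n →
      a ≤ loopA1 m a b ∧ loopA1 m a b ≤ 2 * a := by
  induction n with
  | zero => intro m a b _ ha hab hb; simp at hb; omega
  | succ n ih =>
      intro m a b hm ha hab hb
      obtain ⟨m, rfl⟩ : ∃ k, m = k + 1 := ⟨m - 1, by omega⟩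
      rw [loopA1_succ]
      split
      · rename_i h
        have h2 : (2:Int) ^ (n + 1) = 2 * 2 ^ n := by ring
        exact ih m a (b / 2) (by omega) ha (by omega) (by omega)
      · omega

-- the phase-1 loop on a = 0 drives b to 0
theorem loopA1_zero (n : Nat) :
    ∀ (m : Nat) (b : Int), n ≤ m → 0 ≤ b → b < 2 ^ n → loopA1 m 0 b = 0 := by
  induction n with
  | zero =>
      intro m b _ hb0 hb
      have hb' : b = 0 := by simp at hb; omega
      subst hb'
      cases m with
      | zero => rfl
      | succ k => rw [loopA1_succ, if_neg (by omega)]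
  | succ n ih =>
      intro m b hm hb0 hb
      obtain ⟨m, rfl⟩ : ∃ k, m = k + 1 := ⟨m - 1, by omega⟩
      rw [loopA1_succ]
      split
      · rename_i h
        have h2 : (2:Int) ^ (n + 1) = 2 * 2 ^ n := by ring
        exact ih m (b / 2) (by omega) (by omega) (by omega)
      · omega

-- if the phase-1 loop returns 2a, the input lay in the band [2a·2^k, (2a+1)·2^k)
theorem loopA1_band_of_eq :
    ∀ (m : Nat) (a b : Int), 1 ≤ a → 0 ≤ b → loopA1 m a b = 2 * a →
      ∃ k : Nat, 2 * a * 2 ^ k ≤ b ∧ b < (2 * a + 1) * 2 ^ k := by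
  intro m
  induction m with
  | zero =>
      intro a b ha hb he
      simp only [loopA1] at he
      refine ⟨0, ?_, ?_⟩ <;> simp [he]
  | succ m ih =>
      intro a b ha hb he
      rw [loopA1_succ] at he
      by_cases h : a * 2 < b
      · rw [if_pos h] at he
        obtain ⟨k, hk1, hk2⟩ := ih a (b / 2) ha (by omega) he
        refine ⟨k + 1, ?_, ?_⟩
        · have e : 2 * a * 2 ^ (k + 1) = 2 * (2 * a * 2 ^ k) := by ring
          rw [e]; omega
        · have e : (2 * a + 1) * 2 ^ (k + 1) = 2 * ((2 * a + 1) * 2 ^ k) := by ring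
          rw [e]; omega
      · rw [if_neg h] at he
        refine ⟨0, ?_, ?_⟩ <;> simp [he]

-- conversely, the band forces the phase-1 loop to stop at 2a (given enough fuel)
theorem loopA1_eq_of_band :
    ∀ (k m : Nat) (a b : Int), k ≤ m → 1 ≤ a →
      2 * a * 2 ^ k ≤ b → b < (2 * a + 1) * 2 ^ k → loopA1 m a b = 2 * a := by
  intro k
  induction k with
  | zero =>
      intro m a b _ ha h1 h2
      have hb : b = 2 * a := by simp at h1 h2; omega
      subst hb
      cases m with
      | zero => rfl
      | succ n => rw [loopA1_succ, if_neg (by omega)]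
  | succ k ih =>
      intro m a b hm ha h1 h2
      obtain ⟨m, rfl⟩ : ∃ n, m = n + 1 := ⟨m - 1, by omega⟩
      have e1 : 2 * a * 2 ^ (k + 1) = 2 * (2 * a * 2 ^ k) := by ring
      have e2 : (2 * a + 1) * 2 ^ (k + 1) = 2 * ((2 * a + 1) * 2 ^ k) := by ring
      rw [e1] at h1; rw [e2] at h2
      have hpow : (1:Int) ≤ 2 ^ k := one_le_pow₀ (by norm_num)
      rw [loopA1_succ, if_pos (by nlinarith)]
      exact ih m a (b / 2) (by omega) ha (by omega) (by omega)

-- a band exponent fitting under 2^31 is below 64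
theorem band_k_lt (k : Nat) (a b : Int) (ha : 1 ≤ a) (hb : b ≤ 2147483648)
    (h1 : 2 * a * 2 ^ k ≤ b) : k < 64 := by
  by_contra hk
  push_neg at hk
  have h64 : (2:Int) ^ 64 ≤ 2 ^ k := pow_le_pow_right₀ (by norm_num) hk
  have hpos : (0:Int) < 2 ^ k := by positivity
  have : 2 * 2 ^ k ≤ 2 * a * 2 ^ k := by nlinarith
  have : (2:Int) ^ 64 ≤ 2147483648 := by nlinarith
  norm_num at this

-- the joint-halving loop exits with b = a + 1, a nonnegative and no larger than it started
theorem loopB2_exit (n : Nat) :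
    ∀ (m : Nat) (a b : Int), n ≤ m → 0 ≤ a → a + 1 ≤ b → b < 2 ^ n →
      (loopB2 m a b).2 = (loopB2 m a b).1 + 1 ∧ 0 ≤ (loopB2 m a b).1 ∧ (loopB2 m a b).1 ≤ a := by
  induction n with
  | zero => intro m a b _ ha hab hb; simp at hb; omega
  | succ n ih =>
      intro m a b hm ha hab hb
      obtain ⟨m, rfl⟩ : ∃ k, m = k + 1 := ⟨m - 1, by omega⟩
      rw [loopB2_succ]
      split
      · rename_i h
        have h2 : (2:Int) ^ (n + 1) = 2 * 2 ^ n := by ring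
        have := ih m (a / 2) (b / 2) (by omega) (by omega) (by omega) (by omega)
        exact ⟨this.1, this.2.1, by omega⟩
      · rename_i h
        exact ⟨show b = a + 1 by omega, ha, le_refl a⟩

-- inside an a < b < 2·P01 window the sentinel check never fires: A's loop is B's loop
theorem loopA2_eq_loopB2 (n : Nat) :
    ∀ (m : Nat) (P01 a b : Int), n ≤ m → 0 ≤ a → a + 1 ≤ b → b ≠ P01 → b < 2 * P01 →
      b < 2 ^ n → loopA2 m P01 a b = .inr (loopB2 m a b) := by
  induction n with
  | zero => intro m P01 a b _ ha hab _ _ hb; simp at hb; omega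
  | succ n ih =>
      intro m P01 a b hm ha hab hne hwin hb
      obtain ⟨m, rfl⟩ : ∃ k, m = k + 1 := ⟨m - 1, by omega⟩
      rw [loopA2_succ, loopB2_succ]
      by_cases hadj : b = a + 1
      · rw [if_neg (not_not_intro hadj), if_neg (by omega)]
      · rw [if_pos hadj, if_neg hne, if_pos (by omega)]
        have h2 : (2:Int) ^ (n + 1) = 2 * 2 ^ n := by ring
        exact ih m P01 (a / 2) (b / 2) (by omega) (by omega) (by omega) (by omega)
          (by omega) (by omega)

-- tail of A at an adjacent pair (x, x+1) vs B's trailing-bit strip loop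
theorem tail_eq_strip (n : Nat) :
    ∀ (m : Nat) (x : Int), n ≤ m → 1 ≤ x → x < 2 ^ n →
      (if x % 2 = 0 then x / 2 else fRec m (x / 2) ((x + 1) / 2)) =
        loopB3 (m + 1) x / 2 := by
  induction n with
  | zero => intro m x _ hx hb; simp at hb; omega
  | succ n ih =>
      intro m x hm hx hb
      by_cases hev : x % 2 = 0
      · have hB3 : loopB3 (m + 1) x = x := by
          rw [loopB3_succ, if_neg (by omega)]
        rw [hB3, if_pos hev]
      · have hodd : x % 2 = 1 := by omega
        rw [if_neg hev]
        have hB3 : loopB3 (m + 1) x = loopB3 m (x / 2) := by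
          rw [loopB3_succ, if_pos hodd]
        rw [hB3]
        by_cases hone : x = 1
        · subst hone
          rw [show ((1:Int) + 1) / 2 = 1 by decide, show ((1:Int)) / 2 = 0 by decide,
            loopB3_zero]
          cases m with
          | zero => rfl
          | succ m => rw [fRec_zero_one]; rfl
        · -- x odd, x ≥ 3 : A recurses at (x/2, x/2 + 1); B strips one bit
          have hx3 : (3:Int) ≤ x := by omega
          obtain ⟨m, rfl⟩ : ∃ k, m = k + 1 := ⟨m - 1, by omega⟩
          have hhalf : (x + 1) / 2 = x / 2 + 1 := by omega
          rw [hhalf]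
          have hA1 : loopA1 64 (x / 2) (x / 2 + 1) = x / 2 + 1 := by
            rw [show (64:Nat) = 63 + 1 from rfl, loopA1_succ, if_neg (by omega)]
          have hA2 : loopA2 64 (x / 2) (x / 2) (x / 2 + 1) = .inr (x / 2, x / 2 + 1) := by
            rw [show (64:Nat) = 63 + 1 from rfl, loopA2_succ, if_neg (by simp)]
          rw [fRec_succ, hA1, hA2]
          have h2 : (2:Int) ^ (n + 1) = 2 * 2 ^ n := by ring
          have hx20 : ¬ (x / 2 = 0 ∧ x / 2 + 1 = 1) := by omega
          simp only [hx20, if_false]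
          exact ih m (x / 2) (by omega) (by omega) (by omega)

-- main case analysis outside the change region
theorem main_eq (p1 p2 : Int) (h1 : 0 ≤ p1) (h12 : p1 ≤ p2) (hb : p2 ≤ 2147483648)
    (hD : ¬ D_f p1 p2) : f p1 p2 = f_alt p1 p2 := by
  have hp33 : p2 < 2 ^ 33 := by norm_num at hb ⊢; omega
  by_cases h0 : p1 ≤ 0
  · -- p1 = 0 : A's first loop drives p2 to 0 and the sentinel fires with P01 = 0;
    -- B's ancestor branch fires with 0 = p1
    have hp1 : p1 = 0 := by omega
    subst hp1
    have hz : loopA1 64 0 p2 = 0 := loopA1_zero 33 64 p2 (by norm_num) (by omega) hp33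
    have h2 : loopA2 64 0 0 0 = .inl 0 := by decide
    have hB1 : loopB1 64 0 p2 = 0 := by rw [← loopA1_eq_loopB1, hz]
    rw [f, f_alt, fRec_succ, hz, h2]
    simp [hB1]
  · have hp1 : 1 ≤ p1 := by omega
    have hbd := loopA1_bounds 33 64 p1 p2 (by norm_num) (by omega) h12 hp33
    set b := loopA1 64 p1 p2 with hbdef
    have hB1 : loopB1 64 p1 p2 = b := (loopA1_eq_loopB1 64 p1 p2).symm
    rw [f, f_alt, fRec_succ]
    simp only [hB1, ← hbdef]
    by_cases hba : b = p1
    · -- ancestor case b = a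
      have hA2 : loopA2 64 p1 p1 b = .inl p1 := by
        rw [show (64:Nat) = 63 + 1 from rfl, loopA2_succ, if_pos (by omega), if_pos hba]
      rw [hA2, if_pos (Or.inl hba)]
    · by_cases hb2a : b = 2 * p1
      · rw [if_pos (Or.inr hb2a)]
        by_cases hp3 : 2 < p1
        · -- b = 2a, a ≥ 3 : the sentinel fires after one joint halving
          have hA2 : loopA2 64 p1 p1 b = .inl p1 := by
            rw [show (64:Nat) = 63 + 1 from rfl, loopA2_succ, if_pos (by omega),
              if_neg (by omega), show (63:Nat) = 62 + 1 from rfl, loopA2_succ]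
            rw [hb2a, show 2 * p1 / 2 = p1 from by omega]
            rw [if_pos (by omega), if_pos rfl]
          rw [hA2]
        · -- b = 2a, a ∈ {1, 2} : exactly the change region D_f, excluded by hD
          exfalso
          apply hD
          obtain ⟨k, hk1, hk2⟩ :=
            loopA1_band_of_eq 64 p1 p2 hp1 (by omega) (hb2a ▸ hbdef.symm)
          have hklt : k < 64 := band_k_lt k p1 p2 hp1 hb hk1
          exact ⟨by omega, ⟨⟨k, hklt⟩, hk1, hk2⟩⟩
      · -- proper window p1 < b < 2·p1 : sentinel never fires, the two loops coincide
        rw [if_neg (by tauto)]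
        have hwin1 : p1 + 1 ≤ b := by omega
        have hwin2 : b < 2 * p1 := by omega
        have hb33 : b < 2 ^ 33 := by norm_num at hb ⊢; omega
        have hA2 : loopA2 64 p1 p1 b = .inr (loopB2 64 p1 b) :=
          loopA2_eq_loopB2 33 64 p1 p1 b (by norm_num) (by omega) hwin1 hba hwin2 hb33
        have hex := loopB2_exit 33 64 p1 b (by norm_num) (by omega) hwin1 hb33
        rcases hxy : loopB2 64 p1 b with ⟨x, y⟩
        rw [hxy] at hA2 hex
        rw [hA2]
        simp only at hex
        obtain ⟨hyx, hx0, hxp⟩ := hex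
        subst hyx
        simp only [fd2]
        by_cases hx : x = 0
        · subst hx
          norm_num
        · have hx1 : 1 ≤ x := by omega
          rw [if_neg (by omega)]
          simp only [hx, if_false]
          exact tail_eq_strip 33 63 x (by norm_num) hx1 (by norm_num at hb ⊢; omega)

-- inside D_f the ports give 0 (A) and p1 (B)
theorem f_in_D (p1 p2 : Int) (hD : D_f p1 p2) :
    f p1 p2 = 0 ∧ f_alt p1 p2 = p1 := by
  obtain ⟨hp, ⟨k, hklt⟩, hk1, hk2⟩ := hD
  have hp1 : 1 ≤ p1 := by omega
  have hA1 : loopA1 64 p1 p2 = 2 * p1 :=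
    loopA1_eq_of_band k 64 p1 p2 (by omega) hp1 hk1 hk2
  have hB1 : loopB1 64 p1 p2 = 2 * p1 := by rw [← loopA1_eq_loopB1, hA1]
  constructor
  · rw [f, fRec_succ, hA1]
    rcases hp with hp | hp
    · subst hp
      have hA2 : loopA2 64 1 1 (2 * 1) = .inr (1, 2) := by decide
      rw [hA2]
      norm_num
      rw [show (63:Nat) = 62 + 1 from rfl]
      exact fRec_zero_one 62
    · subst hp
      have hA2 : loopA2 64 2 2 (2 * 2) = .inr (1, 2) := by decide
      rw [hA2]
      norm_num
      rw [show (63:Nat) = 62 + 1 from rfl]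
      exact fRec_zero_one 62
  · rw [f_alt]
    simp [hB1]

-- ===== VERDICT (by name: the statements are the Claim_ definitions above) =====
theorem f_spec : Claim_unchanged_f := by
  intro p1 p2 hdom hpre
  unfold Spec_f
  intro hD
  have hd : p2 ≤ 2147483648 := by
    unfold Dom_f pvDomInt at hdom
    simp at hdom
    omega
  exact main_eq p1 p2 hpre.1 hpre.2 hd hD

theorem f_changed : Claim_changed_f := by
  unfold Claim_changed_f
  refine ⟨by decide, by decide, ⟨by decide, ⟨0, by decide⟩, by decide, by decide⟩,
    by decide, by decide, by decide⟩

theorem f_tight : Claim_exact_f := by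
  intro p1 p2 _ hpre hD
  obtain ⟨hA, hB⟩ := f_in_D p1 p2 hD
  rw [hA, hB]
  obtain ⟨hp, -⟩ := hD
  omega
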